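-- pv_equiv track=rewrite | github.com/GenaroVogelius/back_end_codes | cond-excep-func-pytest/patente.py | letterNumbers
-- ===== SOURCE A (Python) =====
-- def letterNumbers(plate):
--         contador = 0
--         posicion_numero= []
--         while contador <= 9:
--                 posicion = plate.find(str(contador))
--                 contador += 1
--                 if posicion != -1:
--                         posicion_numero.append(posicion)
--         if posicion_numero == []:  #En el caso de que no haya numeros
--                 return True
--         contador = 0
--         for i in posicion_numero:
--                 if not (len(plate)/2) <= posicion_numero[contador]:
--                         return False
--                 else:
--                         contador += 1
--
--         posicion_numero.sort()
--         if (plate[posicion_numero[0]]) == "0":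
--                 return False
--         else:
--                 return True
-- ===== SOURCE B (Python) =====
-- def letterNumbers(plate):
--     for i, ch in enumerate(plate):
--         if ch in "0123456789":
--             return 2 * i >= len(plate) and ch != "0"
--     return True
-- ===== Notes on version B (the rewrite author's own statement) =====
-- stated objective: simpler
-- what changed: One left-to-right scan for the first digit character replaces A's ten str.find scans, the collected position list, the second checking pass and the sort: the earliest digit's index is A's minimum and decides both checks.
import Mathlib
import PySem

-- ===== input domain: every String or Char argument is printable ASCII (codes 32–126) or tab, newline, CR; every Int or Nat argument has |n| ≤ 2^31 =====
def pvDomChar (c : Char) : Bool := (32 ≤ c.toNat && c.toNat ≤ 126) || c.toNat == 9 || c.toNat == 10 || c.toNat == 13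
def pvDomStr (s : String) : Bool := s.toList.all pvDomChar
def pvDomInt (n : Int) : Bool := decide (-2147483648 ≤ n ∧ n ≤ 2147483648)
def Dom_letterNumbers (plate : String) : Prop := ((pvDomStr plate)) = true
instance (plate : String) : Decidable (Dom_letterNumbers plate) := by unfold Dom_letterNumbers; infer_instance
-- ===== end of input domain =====

-- B replaces A's ten str.find scans + position list + checking pass + sort by ONE scan for the
-- first digit character, whose index is exactly A's minimum position. Both programs are total.

-- ===== PORT A =====
-- A's while loop: contador = 0; while contador <= 9: collect plate.find(str(contador)) when != -1
def pvAWhile (plate : String) (contador : Int) (acc : List Int) : List Int :=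
  if contador ≤ 9 then
    let posicion := PySem.Str.find plate (PySem.Int.toStr contador)
    pvAWhile plate (contador + 1) (if posicion ≠ -1 then acc ++ [posicion] else acc)
  else acc
termination_by (10 - contador).toNat
decreasing_by omega

-- A's for loop with early 'return False'; Python compares the float len(plate)/2 <= p, which is
-- exact here (len < 2^53): len/2 <= p  ⟺  len <= 2*p.
def pvACheck (n : Int) : List Int → Bool
  | [] => true
  | p :: rest => if ¬ (n ≤ 2 * p) then false else pvACheck n rest

def letterNumbers (plate : String) : Bool :=
  let posicion_numero := pvAWhile plate 0 []
  if posicion_numero = [] then true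
  else if pvACheck (PySem.Str.len plate) posicion_numero = false then false
  else
    let s := PySem.List.sorted posicion_numero (fun x => x) false
    match PySem.List.pyGet? s 0 with
    | some idx =>
      match PySem.Str.pyGet? plate idx with
      | some c => if c = '0' then false else true
      | none => false  -- unreachable: idx is a successful find, a valid index
    | none => false    -- unreachable: posicion_numero ≠ []

-- ===== PORT B =====
-- for i, ch in enumerate(plate): if ch in "0123456789": return 2*i >= len(plate) and ch != "0"
def pvBLoop (n : Int) : List (Int × Char) → Bool
  | [] => true
  | (i, ch) :: rest =>
      if PySem.Chars.isIn [ch] "0123456789".toList then decide (n ≤ 2 * i) && decide (ch ≠ '0')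
      else pvBLoop n rest

def letterNumbers_alt (plate : String) : Bool :=
  pvBLoop (PySem.Str.len plate) (PySem.List.enumerate plate.toList 0)

-- ===== PRECONDITION & SPEC =====
def Spec_letterNumbers (plate : String) (out : Bool) : Prop := out = letterNumbers_alt plate
instance (plate : String) (out : Bool) : Decidable (Spec_letterNumbers plate out) := by unfold Spec_letterNumbers; infer_instance

-- ===== CLAIM (what is proved, stated in full; the proofs are below) =====
def Claim_equal_letterNumbers : Prop := ∀ (plate : String), Dom_letterNumbers plate → Spec_letterNumbers plate (letterNumbers plate)

-- ===== LEMMAS AND PROOFS =====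

def pvDigits : List Char := ['0','1','2','3','4','5','6','7','8','9']
def pvIsDig (c : Char) : Bool := pvDigits.contains c
def pvPN (l : List Char) : List Int :=
  pvDigits.filterMap (fun ch =>
    if PySem.Chars.find l [ch] ≠ -1 then some (PySem.Chars.find l [ch]) else none)

lemma pv_infix_singleton {c : Char} {l : List Char} : [c] <:+: l ↔ c ∈ l := by
  constructor
  · intro h; exact h.subset (by simp)
  · intro h
    obtain ⟨s, t, rfl⟩ := List.append_of_mem h
    exact ⟨s, t, by simp⟩

lemma pv_prefix_singleton {c : Char} {l : List Char} : [c] <+: l ↔ l[0]? = some c := by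
  cases l with
  | nil => simp
  | cons a t => simp [List.cons_prefix_cons, eq_comm]

lemma pv_find_eq_neg_one_iff {c : Char} {l : List Char} :
    PySem.Chars.find l [c] = -1 ↔ c ∉ l := by
  rw [PySem.Chars.find_eq_neg_one_iff, pv_infix_singleton]

lemma pv_find_char_spec {c : Char} {l : List Char} (h : c ∈ l) :
    0 ≤ PySem.Chars.find l [c] ∧ l[(PySem.Chars.find l [c]).toNat]? = some c ∧
      ∀ i < (PySem.Chars.find l [c]).toNat, l[i]? ≠ some c := by
  have h0 : 0 ≤ PySem.Chars.find l [c] :=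
    (PySem.Chars.find_nonneg_iff _ _).2 (pv_infix_singleton.2 h)
  obtain ⟨h1, h2⟩ := PySem.Chars.find_spec (s := l) (sub := [c]) h0
  refine ⟨h0, ?_, ?_⟩
  · have := pv_prefix_singleton.1 h1
    simpa [List.getElem?_drop] using this
  · intro i hi hic
    exact h2 i hi (pv_prefix_singleton.2 (by simpa [List.getElem?_drop] using hic))

lemma pvAWhile_eq (plate : String) : ∀ (k : Nat) (c : Int) (acc : List Int),
    10 - (k : Int) = c → k ≤ 10 →
    pvAWhile plate c acc = acc ++ (PySem.List.pyRange c 10 1).filterMap (fun d =>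
      if PySem.Str.find plate (PySem.Int.toStr d) ≠ -1
      then some (PySem.Str.find plate (PySem.Int.toStr d)) else none) := by
  intro k
  induction k with
  | zero =>
    intro c acc hc _
    rw [pvAWhile, PySem.List.pyRange_one_eq_nil (by omega)]
    rw [if_neg (by omega)]; simp
  | succ k ih =>
    intro c acc hc hk
    rw [pvAWhile, if_pos (show c ≤ 9 by omega)]
    rw [ih (c + 1) _ (by omega) (by omega)]
    conv_rhs => rw [PySem.List.pyRange_one_cons (show c < 10 by omega), List.filterMap_cons]
    by_cases hp : PySem.Chars.find plate.toList (PySem.Int.toChars c) = -1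
    · simp [hp]
    · simp [hp]

lemma pvPN_eq (plate : String) : pvAWhile plate 0 [] = pvPN plate.toList := by
  rw [pvAWhile_eq plate 10 0 [] (by norm_num) (by norm_num)]
  have hr : PySem.List.pyRange 0 10 1 = [0,1,2,3,4,5,6,7,8,9] := by decide
  rw [hr]
  simp only [pvPN, pvDigits, List.filterMap_cons, List.filterMap_nil, List.nil_append]
  norm_num [PySem.Str.find_eq]
  rfl

lemma pvACheck_true_iff (n : Int) (xs : List Int) :
    pvACheck n xs = true ↔ ∀ p ∈ xs, n ≤ 2 * p := by
  induction xs with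
  | nil => simp [pvACheck]
  | cons p rest ih =>
    by_cases h : n ≤ 2 * p
    · simp [pvACheck, h, ih]
    · simp [pvACheck, h]

lemma pvIsDig_isIn (ch : Char) :
    PySem.Chars.isIn [ch] "0123456789".toList = pvIsDig ch := by
  have hL : "0123456789".toList = pvDigits := by decide
  have h : PySem.Chars.isIn [ch] "0123456789".toList = true ↔ ch ∈ pvDigits := by
    rw [PySem.Chars.isIn_iff_infix, pv_infix_singleton, hL]
  cases hb : PySem.Chars.isIn [ch] "0123456789".toList with
  | false =>
    have hm : ch ∉ pvDigits := by
      intro hm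
      have hT := h.2 hm
      rw [hb] at hT; exact absurd hT (by simp)
    simp [pvIsDig, hm]
  | true =>
    have hm := h.1 hb
    simp [pvIsDig, hm]

lemma pvBLoop_none (n : Int) (l : List Char) (s : Int)
    (h : ∀ ch ∈ l, pvIsDig ch = false) :
    pvBLoop n (PySem.List.enumerate l s) = true := by
  induction l generalizing s with
  | nil => simp [PySem.List.enumerate_nil, pvBLoop]
  | cons c t ih =>
    rw [PySem.List.enumerate_cons, pvBLoop, pvIsDig_isIn]
    rw [h c (by simp)]
    simp only [ite_false, Bool.false_eq_true]
    exact ih (s + 1) (fun ch hch => h ch (by simp [hch]))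

lemma pvBLoop_found (n : Int) (l : List Char) : ∀ (s : Int) (j : Nat) (hj : j < l.length),
    (∀ i (hi : i < j), pvIsDig (l[i]'(by omega)) = false) → pvIsDig (l[j]'hj) = true →
    pvBLoop n (PySem.List.enumerate l s) =
      (decide (n ≤ 2 * (s + j)) && decide (l[j]'hj ≠ '0')) := by
  induction l with
  | nil => intro s j hj; simp at hj
  | cons c t ih =>
    intro s j hj hbef hdig
    rw [PySem.List.enumerate_cons, pvBLoop, pvIsDig_isIn]
    cases j with
    | zero =>
      simp only [List.getElem_cons_zero] at hdig
      rw [hdig]; simp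
    | succ j' =>
      have h0 : pvIsDig c = false := by
        have := hbef 0 (Nat.succ_pos _); simpa using this
      rw [h0]
      simp only [Bool.false_eq_true, ite_false]
      have hj' : j' < t.length := by simpa using hj
      have e1 : (((j' + 1 : Nat)) : Int) = (j' : Int) + 1 := by push_cast; ring
      have e2 : s + ((j' : Int) + 1) = (s + 1) + (j' : Int) := by ring
      rw [List.getElem_cons_succ, e1, e2]
      exact ih (s + 1) j' hj'
        (fun i hi => by have := hbef (i + 1) (by omega); simpa using this)
        (by simpa using hdig)

lemma pvPN_nil_of_nodig (l : List Char) (h : ∀ ch ∈ l, pvIsDig ch = false) :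
    pvPN l = [] := by
  rw [pvPN, List.filterMap_eq_nil_iff]
  intro ch hch
  have hnl : ch ∉ l := by
    intro hcl
    have hc' := h ch hcl
    rw [pvIsDig] at hc'
    exact absurd (List.contains_iff_mem.mpr hch) (by rw [hc']; exact Bool.false_ne_true)
  simp [pv_find_eq_neg_one_iff.2 hnl]

lemma pvPN_mem_spec (l : List Char) (p : Int) (hp : p ∈ pvPN l) :
    ∃ ch ∈ pvDigits, ch ∈ l ∧ PySem.Chars.find l [ch] = p := by
  rw [pvPN, List.mem_filterMap] at hp
  obtain ⟨ch, hch, hv⟩ := hp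
  by_cases hne : PySem.Chars.find l [ch] ≠ -1
  · rw [if_pos hne] at hv
    refine ⟨ch, hch, ?_, by simpa using hv⟩
    by_contra hcl
    exact hne (pv_find_eq_neg_one_iff.2 hcl)
  · simp [hne] at hv

-- ===== VERDICT (by name: the statement is the Claim_ definition above) =====
theorem letterNumbers_spec : Claim_equal_letterNumbers := by
  intro plate _
  unfold Spec_letterNumbers letterNumbers letterNumbers_alt
  set l := plate.toList with hl
  rw [pvPN_eq]
  by_cases hd : ∀ ch ∈ l, pvIsDig ch = false
  · rw [pvPN_nil_of_nodig l hd, pvBLoop_none _ l 0 hd]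
    simp
  · -- there is a digit; j = index of the first one
    rw [not_forall] at hd
    simp only [not_forall, exists_prop] at hd
    have hex : ∃ x ∈ l, pvIsDig x = true := by
      obtain ⟨ch, hch, hne⟩ := hd
      exact ⟨ch, hch, by simpa using hne⟩
    set j := l.findIdx pvIsDig with hjdef
    have hjlt : j < l.length := List.findIdx_lt_length.2 (by simpa using hex)
    have hjd : pvIsDig (l[j]'hjlt) = true := List.findIdx_getElem (w := hjlt)
    have hbef : ∀ i (hi : i < j), pvIsDig (l[i]'(by omega)) = false := by
      intro i hi
      simpa using List.not_of_lt_findIdx hi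
    -- the find of the first digit's character is exactly j
    have hfind : PySem.Chars.find l [l[j]'hjlt] = (j : Int) := by
      have hmem : (l[j]'hjlt) ∈ l := List.getElem_mem _
      obtain ⟨h0, hocc, hmin⟩ := pv_find_char_spec hmem
      set t := (PySem.Chars.find l [l[j]'hjlt]).toNat with ht
      have htle : t ≤ j := by
        by_contra hgt
        exact hmin j (by omega) (by simp)
      have hjle : j ≤ t := by
        by_contra hgt
        have htl : t < l.length := by omega
        have : l[t]'htl = l[j]'hjlt := by
          have := hocc; rw [List.getElem?_eq_getElem htl] at this
          simpa using this
        have hf := hbef t (by omega)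
        rw [this, hjd] at hf; simp at hf
      have : t = j := by omega
      omega
    have hjmem : (j : Int) ∈ pvPN l := by
      rw [pvPN, List.mem_filterMap]
      refine ⟨l[j]'hjlt, ?_, ?_⟩
      · have := hjd; rwa [pvIsDig, List.contains_iff_mem] at this
      · rw [if_pos (by rw [hfind]; omega), hfind]
    have hge : ∀ p ∈ pvPN l, (j : Int) ≤ p := by
      intro p hp
      obtain ⟨ch, hchd, hchl, hfch⟩ := pvPN_mem_spec l p hp
      obtain ⟨h0, hocc, _⟩ := pv_find_char_spec hchl
      rw [hfch] at h0 hocc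
      have hptl : p.toNat < l.length := by
        by_contra hge'
        rw [List.getElem?_eq_none (by omega)] at hocc; simp at hocc
      have : j ≤ p.toNat := by
        by_contra hlt
        have hf := hbef p.toNat (by omega)
        have hchp : l[p.toNat]'hptl = ch := by
          rw [List.getElem?_eq_getElem hptl] at hocc; simpa using hocc
        rw [hchp, pvIsDig] at hf
        exact absurd (List.contains_iff_mem.mpr hchd) (by rw [hf]; exact Bool.false_ne_true)
      omega
    have hne : pvPN l ≠ [] := fun h => by simp [h] at hjmem
    have hlen : PySem.Str.len plate = (l.length : Int) := by
      simp [PySem.Str.len_eq, hl]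
    rw [if_neg hne]
    by_cases hc : (l.length : Int) ≤ 2 * (j : Int)
    · -- check passes
      have hchk : pvACheck (PySem.Str.len plate) (pvPN l) = true := by
        rw [hlen, pvACheck_true_iff]
        intro p hp
        have := hge p hp; omega
      rw [hchk]
      simp only [Bool.true_eq_false, ite_false]
      -- head of the sorted list is j
      have hsne : PySem.List.sorted (pvPN l) (fun x => x) false ≠ [] := by
        rw [Ne, PySem.List.sorted_eq_nil_iff]; exact hne
      obtain ⟨m, rest, hms⟩ : ∃ m rest,
          PySem.List.sorted (pvPN l) (fun x => x) false = m :: rest := by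
        cases hx : PySem.List.sorted (pvPN l) (fun x => x) false with
        | nil => exact absurd hx hsne
        | cons a b => exact ⟨a, b, rfl⟩
      have hmj : m = (j : Int) := by
        have h1 : (j : Int) ≤ m := by
          apply hge
          have : m ∈ PySem.List.sorted (pvPN l) (fun x => x) false := by simp [hms]
          rwa [PySem.List.mem_sorted] at this
        have h2 : m ≤ (j : Int) := PySem.List.key_head_sorted_le (pvPN l) (fun x => x) hms _ hjmem
        omega
      rw [hms, hmj]
      have hget : PySem.List.pyGet? ((j : Int) :: rest) 0 = some (j : Int) := by
        simp
      have hsget : PySem.Str.pyGet? plate (j : Int) = some (l[j]'hjlt) := by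
        rw [PySem.Str.pyGet?_natCast, ← hl, List.getElem?_eq_getElem hjlt]
      rw [hget]
      simp only [hsget]
      rw [pvBLoop_found _ l 0 j hjlt hbef hjd]
      have hdec : decide ((PySem.Str.len plate) ≤ 2 * ((0 : Int) + (j : Nat))) = true := by
        rw [hlen]; simp; omega
      rw [hdec]
      by_cases h0 : (l[j]'hjlt) = '0' <;> simp [h0]
    · -- check fails: A returns False, B's first conjunct is false
      have hchk : pvACheck (PySem.Str.len plate) (pvPN l) = false := by
        rw [hlen]
        by_contra hcc
        simp only [Bool.not_eq_false] at hcc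
        rw [pvACheck_true_iff] at hcc
        exact hc (hcc _ hjmem)
      rw [hchk]
      simp only [ite_true]
      rw [pvBLoop_found _ l 0 j hjlt hbef hjd]
      have : decide ((PySem.Str.len plate) ≤ 2 * ((0 : Int) + (j : Nat))) = false := by
        rw [hlen]; simp; omega
      rw [this, Bool.false_and]
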